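-- pv_equiv track=rewrite | github.com/daveisagit/advent-of-code | src/2024/day_24.py | value_to_dict
-- ===== SOURCE A (Python) =====
-- def value_to_dict(v, sz=45):
--     """Decimal to dict of binary values"""
--     d = {i: 0 for i in range(sz)}
--     idx = 0
--     while v:
--         d[idx] = v % 2
--         v = v // 2
--         idx += 1
--     return d
-- ===== SOURCE B (Python) =====
-- def value_to_dict(v, sz=45):
--     """Decimal to dict of binary values"""
--     bits = bin(v)[2:][::-1] if v else ''
--     return {i: int(bits[i]) if i < len(bits) else 0 for i in range(max(sz, len(bits)))}
-- ===== Notes on version B (the rewrite author's own statement) =====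
-- stated objective: alternative
-- what changed: Instead of seeding a dict with zeros and destructively halving v in a while-loop that overwrites entries, B formats v once as the string bin(v), reverses it, and builds the whole dict in a single comprehension that parses each bit character (keys beyond sz appear exactly as in A).
import Mathlib
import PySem

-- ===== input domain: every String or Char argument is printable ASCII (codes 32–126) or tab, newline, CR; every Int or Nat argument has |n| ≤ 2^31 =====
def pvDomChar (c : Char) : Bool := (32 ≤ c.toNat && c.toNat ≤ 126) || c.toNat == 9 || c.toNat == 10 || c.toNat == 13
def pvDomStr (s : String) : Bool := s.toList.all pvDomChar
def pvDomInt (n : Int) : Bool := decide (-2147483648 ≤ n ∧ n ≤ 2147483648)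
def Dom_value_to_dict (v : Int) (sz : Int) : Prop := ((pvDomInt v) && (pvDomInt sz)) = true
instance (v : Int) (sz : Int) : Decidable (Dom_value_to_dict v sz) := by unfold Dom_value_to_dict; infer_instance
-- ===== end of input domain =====

-- B replaces A's destructive halving loop over a pre-seeded dict by a single dict
-- comprehension reading the bits out of the string bin(v) (alternative formulation,
-- same cost; return value only — no mutation is involved).

-- ===== PORT A =====
-- the while-loop; fuel v.natAbs + 1 is ample for 0 ≤ v (the loop runs bit_length(v) ≤ natAbs
-- times); for v < 0 Python diverges, which Pre_ excludes.
def vtdLoopA (fuel : Nat) (v : Int) (idx : Int) (d : PySem.Dict Int Int) : PySem.Dict Int Int :=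
  match fuel with
  | 0 => d
  | fuel + 1 =>
    if v = 0 then d
    else vtdLoopA fuel (PySem.Int.floordiv v 2) (idx + 1) (d.insert idx (PySem.Int.mod v 2))

-- the seed dict {i: 0 for i in range(sz)}
def vtdSeed (sz : Int) : PySem.Dict Int Int :=
  (PySem.List.pyRange 0 sz 1).foldl (fun d i => d.insert i 0) PySem.Dict.empty

def value_to_dict (v : Int) (sz : Int) : List (Int × Int) :=
  (vtdLoopA (v.natAbs + 1) v 0 (vtdSeed sz)).items

-- ===== PORT B =====
-- bits = bin(v)[2:][::-1] if v else '' :  bin(v) is PySem.Int.pyBin (as List Char via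
-- toList_pyBin); [2:] is List.drop 2 (PySem.List.slice_from_natCast); [::-1] is
-- List.reverse (PySem.List.slice?_none_none_neg_one).
-- int(bits[i]) under the guard i < len(bits): bits[i] is PySem.List.pyGetD (in range by the
-- guard), int(·) of the one-char string is PySem.Int.ofChars? — never none on a binary digit
-- char, so .getD 0 is exact here.
def value_to_dict_alt (v : Int) (sz : Int) : List (Int × Int) :=
  let bits : List Char := if v ≠ 0 then ((PySem.Int.pyBin v).toList.drop 2).reverse else []
  ((PySem.List.pyRange 0 (max sz (bits.length : Int)) 1).foldl
    (fun d i =>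
      d.insert i (if i < (bits.length : Int)
                  then (PySem.Int.ofChars? [PySem.List.pyGetD bits i '0']).getD 0
                  else 0))
    PySem.Dict.empty).items

-- ===== PRECONDITION & SPEC =====
-- Pre_ excludes v < 0, on which Python A's 'while v:' loop never terminates (v // 2 → -1).
def Pre_value_to_dict (v : Int) (sz : Int) : Prop := 0 ≤ v
instance (v : Int) (sz : Int) : Decidable (Pre_value_to_dict v sz) := by
  unfold Pre_value_to_dict; infer_instance

def pvWitness_value_to_dict : Int × Int := (37, 6)

def Spec_value_to_dict (v : Int) (sz : Int) (out : List (Int × Int)) : Prop := out = value_to_dict_alt v sz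
instance (v : Int) (sz : Int) (out : List (Int × Int)) : Decidable (Spec_value_to_dict v sz out) := by unfold Spec_value_to_dict; infer_instance

-- ===== CLAIM (what is proved, stated in full; the proofs are below) =====
def Claim_equal_value_to_dict : Prop := ∀ (v : Int) (sz : Int), Dom_value_to_dict v sz → Pre_value_to_dict v sz → Spec_value_to_dict v sz (value_to_dict v sz)

-- ===== LEMMAS AND PROOFS =====

-- bit i of v (0 ≤ v): the value A's loop stores at key i
def vtdBit (v i : Int) : Int := PySem.Int.mod (PySem.Int.floordiv v (2 ^ i.toNat)) 2

-- A's while-loop is the fold over range(bit_length(v)) inserting the bits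
theorem vtdLoopA_eq_fold (fuel : Nat) : ∀ (v idx : Int) (d : PySem.Dict Int Int),
    0 ≤ v → v.natAbs < fuel →
    vtdLoopA fuel v idx d =
      (PySem.List.pyRange 0 (PySem.Int.bitLength v) 1).foldl
        (fun d i => d.insert (idx + i) (PySem.Int.mod (PySem.Int.floordiv v (2 ^ i.toNat)) 2)) d := by
  induction fuel with
  | zero => intro v idx d _ h; omega
  | succ fuel ih =>
    intro v idx d hv hlt
    by_cases h0 : v = 0
    · subst h0
      simp [vtdLoopA, PySem.Int.bitLength_zero, PySem.List.pyRange_one_eq_nil (by norm_num : (0:Int) ≤ 0)]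
    · have hvpos : 0 < v := lt_of_le_of_ne hv (Ne.symm h0)
      have hhalf : 0 ≤ PySem.Int.floordiv v 2 := by
        rw [PySem.Int.floordiv_eq_ediv_of_pos (by norm_num)]; omega
      have hsize : (PySem.Int.floordiv v 2).natAbs < fuel := by
        rw [PySem.Int.floordiv_eq_ediv_of_pos (by norm_num)]; omega
      rw [show vtdLoopA (fuel+1) v idx d
            = vtdLoopA fuel (PySem.Int.floordiv v 2) (idx + 1) (d.insert idx (PySem.Int.mod v 2)) by
          simp [vtdLoopA, h0]]
      rw [ih _ _ _ hhalf hsize]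
      rw [PySem.Int.bitLength_of_pos hvpos]
      set m : Nat := PySem.Int.bitLength (PySem.Int.floordiv v 2) with hm
      have hcons : PySem.List.pyRange 0 ((m : Int) + 1) 1
          = 0 :: PySem.List.pyRange 1 ((m : Int) + 1) 1 :=
        PySem.List.pyRange_one_cons (by positivity)
      push_cast
      rw [hcons]
      simp only [List.foldl_cons]
      rw [show (2:Int) ^ ((0:Int)).toNat = 1 by norm_num,
          show PySem.Int.floordiv v 1 = v by
            rw [PySem.Int.floordiv_eq_ediv_of_pos (by norm_num)]; exact Int.ediv_one v,
          add_zero]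
      rw [PySem.List.pyRange_one 0 (m:Int), PySem.List.pyRange_one 1 ((m:Int)+1)]
      have h1 : (((m:Int) - 0).toNat) = m := by omega
      have h2 : ((((m:Int) + 1) - 1).toNat) = m := by omega
      rw [h1, h2]
      rw [List.foldl_map, List.foldl_map]
      congr 1
      funext d' k
      have hsh : PySem.Int.floordiv (PySem.Int.floordiv v 2) (2 ^ ((0:Int) + (k:Int)).toNat)
          = PySem.Int.floordiv v (2 ^ ((1:Int) + (k:Int)).toNat) := by
        have hk0 : ((0:Int) + (k:Int)).toNat = k := by omega
        have hk1 : ((1:Int) + (k:Int)).toNat = k + 1 := by omega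
        rw [hk0, hk1,
            PySem.Int.floordiv_eq_ediv_of_pos (by norm_num : (0:Int) < 2),
            PySem.Int.floordiv_eq_ediv_of_pos (by positivity : (0:Int) < 2 ^ k),
            PySem.Int.floordiv_eq_ediv_of_pos (by positivity : (0:Int) < 2 ^ (k+1))]
        rw [Int.ediv_ediv_of_nonneg (by norm_num)]
        congr 1
        ring
      rw [hsh]
      ring_nf

-- Nat.toDigitsCore at base 2 (what bin(v) wraps), written little-endian
theorem tdc_two (fuel : Nat) : ∀ (n : Nat) (ds : List Char), 0 < n → n ≤ fuel →
    Nat.toDigitsCore 2 fuel n ds =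
      ((List.range (PySem.Int.bitLength (n:Int))).map
        (fun k => Nat.digitChar (n / 2 ^ k % 2))).reverse ++ ds := by
  induction fuel with
  | zero => intro n ds h1 h2; omega
  | succ fuel ih =>
    intro n ds h1 h2
    by_cases hsmall : n / 2 = 0
    · have hn1 : n = 1 := by omega
      subst hn1
      simp only [Nat.toDigitsCore, hsmall, if_pos]
      norm_num [show PySem.Int.bitLength (1:Int) = 1 from by decide, List.range_one]
    · have hstep : Nat.toDigitsCore 2 (fuel + 1) n ds
          = Nat.toDigitsCore 2 fuel (n / 2) (Nat.digitChar (n % 2) :: ds) := by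
        simp [Nat.toDigitsCore, hsmall]
      rw [hstep, ih (n / 2) _ (by omega) (by omega)]
      rw [PySem.Int.bitLength_natCast (by omega : 0 < n)]
      rw [List.range_succ_eq_map, List.map_cons, List.map_map, List.reverse_cons',
          List.concat_eq_append, List.append_assoc]
      congr 1
      · congr 1
        apply List.map_congr_left
        intro k _
        simp only [Function.comp_apply]
        rw [Nat.div_div_eq_div_mul, ← pow_succ']
      · simp

-- bin's digit string, little-endian after the reversal in B
theorem toDigits_two_eq (n : Nat) (h : 0 < n) :
    Nat.toDigits 2 n =
      ((List.range (PySem.Int.bitLength (n : Int))).map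
        (fun k => Nat.digitChar (n / 2 ^ k % 2))).reverse := by
  unfold Nat.toDigits
  rw [tdc_two (n + 1) n [] h (by omega), List.append_nil]

-- inserting distinct fresh keys appends to the items list
theorem items_foldl_insert_map (l : List Int) (f : Int → Int) :
    ∀ d : PySem.Dict Int Int, l.Nodup → (∀ i ∈ l, d.contains i = false) →
    (l.foldl (fun d i => d.insert i (f i)) d).items = d.items ++ l.map (fun i => (i, f i)) := by
  induction l with
  | nil => intro d _ _; simp
  | cons a l ih =>
    intro d hnd hfresh
    simp only [List.foldl_cons, List.map_cons]
    rw [ih (d.insert a (f a)) (List.Nodup.of_cons hnd)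
        (by
          intro i hi
          rw [PySem.Dict.contains_insert]
          have hne : i ≠ a := fun he => (List.nodup_cons.mp hnd).1 (he ▸ hi)
          simp [hne, hfresh i (List.mem_cons_of_mem a hi)])]
    rw [PySem.Dict.items_insert_of_not_contains d (f a) (hfresh a List.mem_cons_self)]
    simp

-- overwriting keys 0..n-1 of a dict whose items are 0..m-1 (A's loop on the seed)
theorem items_foldl_overwrite (n : Nat) :
    ∀ (m : Int) (h b : Int → Int) (d : PySem.Dict Int Int),
    d.items = (PySem.List.pyRange 0 m 1).map (fun i => (i, h i)) →
    ((PySem.List.pyRange 0 (n : Int) 1).foldl (fun d i => d.insert i (b i)) d).items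
      = (PySem.List.pyRange 0 (max m (n : Int)) 1).map
          (fun i => (i, if i < (n : Int) then b i else h i)) := by
  induction n with
  | zero =>
    intro m h b d hd
    simp only [Nat.cast_zero]
    rw [PySem.List.pyRange_one_eq_nil (le_refl 0)]
    simp only [List.foldl_nil, hd]
    by_cases hm : 0 ≤ m
    · rw [max_eq_left (by omega)]
      apply List.map_congr_left
      intro i hi
      have := (PySem.List.mem_pyRange_one.mp hi).1
      rw [if_neg (by omega : ¬ i < (0:Int))]
    · rw [max_eq_right (by omega), PySem.List.pyRange_one_eq_nil (by omega),
          PySem.List.pyRange_one_eq_nil (le_refl 0)]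
      simp
  | succ n ih =>
    intro m h b d hd
    have hpeel : PySem.List.pyRange 0 ((n:Int) + 1) 1
        = PySem.List.pyRange 0 (n:Int) 1 ++ [(n:Int)] :=
      PySem.List.pyRange_one_succ_right (by positivity)
    push_cast
    rw [hpeel, List.foldl_append]
    simp only [List.foldl_cons, List.foldl_nil]
    have hkeys : (List.foldl (fun d i => d.insert i (b i)) d (PySem.List.pyRange 0 (n:Int) 1)).items
        = (PySem.List.pyRange 0 (max m (n:Int)) 1).map (fun i => (i, if i < (n:Int) then b i else h i)) :=
      ih m h b d hd
    set X := List.foldl (fun d i => d.insert i (b i)) d (PySem.List.pyRange 0 (n:Int) 1) with hX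
    have hkX : X.keys = PySem.List.pyRange 0 (max m (n:Int)) 1 := by
      show X.items.map (fun p => p.1) = _
      rw [hkeys, List.map_map]
      rw [show ((fun p : Int × Int => p.1) ∘ fun i => (i, if i < (n:Int) then b i else h i))
            = fun i => i from rfl]
      exact List.map_id' _
    by_cases hc : (n:Int) < max m (n:Int)
    · -- n < m : key n present, overwritten in place; bound unchanged
      have hmax : max m ((n:Int)+1) = max m (n:Int) := by omega
      have hcont : X.contains (n:Int) = true := by
        rw [PySem.Dict.contains_eq_decide_mem_keys, hkX]
        simp [PySem.List.mem_pyRange_one]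
        omega
      rw [PySem.Dict.items_insert_of_contains X (b (n:Int)) hcont, hkeys, hmax, List.map_map]
      apply List.map_congr_left
      intro i hi
      have hmem := PySem.List.mem_pyRange_one.mp hi
      by_cases hin : i = (n:Int)
      · subst hin; simp
      · simp only [Function.comp_apply]
        rw [if_neg (by simpa using hin)]
        simp only [show (i < (n:Int)+1) ↔ (i < (n:Int)) by constructor <;> intro <;> omega]
    · -- m ≤ n : key n fresh, appended
      have hmn : max m (n:Int) = (n:Int) := by omega
      have hmax : max m ((n:Int)+1) = (n:Int)+1 := by omega
      have hcont : X.contains (n:Int) = false := by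
        rw [PySem.Dict.contains_eq_decide_mem_keys, hkX, hmn]
        simp [PySem.List.mem_pyRange_one]
      rw [PySem.Dict.items_insert_of_not_contains X (b (n:Int)) hcont, hkeys, hmn, hmax]
      rw [PySem.List.pyRange_one_succ_right (by positivity)]
      rw [List.map_append]
      congr 1
      · apply List.map_congr_left
        intro i hi
        have hmem := PySem.List.mem_pyRange_one.mp hi
        rw [if_pos (by omega), if_pos (by omega)]
      · simp

-- int() of the one bit character equals the bit A stores
theorem vtdBitChar (v i : Int) (hv : 0 ≤ v) (hi : 0 ≤ i) :
    (PySem.Int.ofChars? [Nat.digitChar (v.toNat / 2 ^ i.toNat % 2)]).getD 0 = vtdBit v i := by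
  have hbit : vtdBit v i = ((v.toNat / 2 ^ i.toNat % 2 : Nat) : Int) := by
    unfold vtdBit
    conv_lhs => rw [← Int.toNat_of_nonneg hv]
    rw [PySem.Int.floordiv_eq_ediv_of_pos (by positivity : (0:Int) < 2 ^ i.toNat),
        PySem.Int.mod_eq_emod_of_pos (by norm_num : (0:Int) < 2)]
    push_cast
    rfl
  rw [hbit]
  rcases (by omega : v.toNat / 2 ^ i.toNat % 2 = 0 ∨ v.toNat / 2 ^ i.toNat % 2 = 1)
    with h | h <;> rw [h] <;> decide

-- B's bits list, little-endian, for v > 0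
theorem bits_eq (v : Int) (hv : 0 < v) :
    (((PySem.Int.pyBin v).toList.drop 2).reverse : List Char)
      = (List.range (PySem.Int.bitLength v)).map
          (fun k => Nat.digitChar (v.toNat / 2 ^ k % 2)) := by
  have hv' : ((v.toNat : Int)) = v := Int.toNat_of_nonneg (le_of_lt hv)
  rw [PySem.Int.toList_pyBin]
  unfold PySem.Int.toBinChars0b
  rw [if_neg (by omega : ¬ v < 0)]
  simp only [List.drop_succ_cons, List.drop_zero]
  rw [toDigits_two_eq v.toNat (by omega), List.reverse_reverse, hv']

-- ===== VERDICT (by name: the statement is the Claim_ definition above) =====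
theorem value_to_dict_spec : Claim_equal_value_to_dict := by
  intro v sz _ hpre
  unfold Spec_value_to_dict value_to_dict value_to_dict_alt vtdSeed
  rw [vtdLoopA_eq_fold (v.natAbs + 1) v 0 _ hpre (by omega)]
  simp only [zero_add]
  -- the seed's items
  have hseed := items_foldl_insert_map (PySem.List.pyRange 0 sz 1) (fun _ => 0)
      PySem.Dict.empty (PySem.List.nodup_pyRange_one 0 sz)
      (by intro i _; exact PySem.Dict.contains_empty i)
  simp only [show (PySem.Dict.empty : PySem.Dict Int Int).items = [] from rfl, List.nil_append] at hseed
  -- A's items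
  rw [items_foldl_overwrite (PySem.Int.bitLength v) sz (fun _ => 0)
      (fun i => PySem.Int.mod (PySem.Int.floordiv v (2 ^ i.toNat)) 2) _ hseed]
  -- B's items
  set bits : List Char :=
    (if v ≠ 0 then ((PySem.Int.pyBin v).toList.drop 2).reverse else []) with hbitsdef
  have hB := items_foldl_insert_map (PySem.List.pyRange 0 (max sz (bits.length : Int)) 1)
      (fun i => if i < (bits.length : Int)
                then (PySem.Int.ofChars? [PySem.List.pyGetD bits i '0']).getD 0
                else 0)
      PySem.Dict.empty (PySem.List.nodup_pyRange_one 0 (max sz (bits.length : Int)))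
      (by intro i _; exact PySem.Dict.contains_empty i)
  simp only [show (PySem.Dict.empty : PySem.Dict Int Int).items = [] from rfl, List.nil_append] at hB
  rw [hB]
  -- the two maps agree pointwise
  by_cases h0 : v = 0
  · have hb0 : bits = [] := by rw [hbitsdef]; simp [h0]
    rw [hb0]
    simp only [List.length_nil, Nat.cast_zero, h0, PySem.Int.bitLength_zero]
    apply List.map_congr_left
    intro i hi
    have h1 := (PySem.List.mem_pyRange_one.mp hi).1
    have h2 : ¬ i < (0:Int) := by omega
    simp [h2]
  · have hvpos : 0 < v := lt_of_le_of_ne hpre (Ne.symm h0)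
    have hbits : bits = (List.range (PySem.Int.bitLength v)).map
        (fun k => Nat.digitChar (v.toNat / 2 ^ k % 2)) := by
      rw [hbitsdef, if_pos h0, bits_eq v hvpos]
    have hlen : bits.length = PySem.Int.bitLength v := by
      rw [hbits, List.length_map, List.length_range]
    rw [hlen]
    apply List.map_congr_left
    intro i hi
    have hmem := PySem.List.mem_pyRange_one.mp hi
    by_cases hiL : i < ((PySem.Int.bitLength v : Nat) : Int)
    · rw [if_pos hiL, if_pos hiL]
      congr 1
      have hget : PySem.List.pyGetD bits i '0'
          = Nat.digitChar (v.toNat / 2 ^ i.toNat % 2) := by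
        rw [PySem.List.pyGetD_eq_getElem bits '0' hmem.1
              (by rw [hlen]; exact_mod_cast hiL)]
        simp only [hbits, List.getElem_map, List.getElem_range]
      rw [hget, vtdBitChar v i hpre hmem.1]
      rfl
    · rw [if_neg hiL, if_neg hiL]
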